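-- pv_equiv track=rewrite | github.com/Fozzy3/pp-pipe-dt | src/pipeline/analysis/delay_drift.py | _classify_period
-- ===== SOURCE A (Python) =====
-- TIME_PERIODS = {
--     "AM_PEAK": (6, 9),
--     "MIDDAY": (9, 15),
--     "PM_PEAK": (15, 19),
--     "EVENING": (19, 23),
--     "NIGHT": (23, 6),
-- }
--
-- def _classify_period(hour: int) -> str:
--     for name, (start, end) in TIME_PERIODS.items():
--         if start <= end:
--             if start <= hour < end:
--                 return name
--         else:  # wraps midnight
--             if hour >= start or hour < end:
--                 return name
--     return "NIGHT"
-- ===== SOURCE B (Python) =====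
-- TIME_PERIODS = {
--     "AM_PEAK": (6, 9),
--     "MIDDAY": (9, 15),
--     "PM_PEAK": (15, 19),
--     "EVENING": (19, 23),
--     "NIGHT": (23, 6),
-- }
--
-- _PERIOD_BY_HOUR = {
--     h: name
--     for name, (start, end) in TIME_PERIODS.items()
--     for h in (range(start, end) if start <= end
--               else list(range(start, 24)) + list(range(0, end)))
-- }
--
-- def _classify_period(hour: int) -> str:
--     return _PERIOD_BY_HOUR.get(hour, "NIGHT")
-- ===== Notes on version B (the rewrite author's own statement) =====
-- stated objective: idiomatic
-- what changed: A's per-call loop over TIME_PERIODS with range/wrap tests is replaced by a module-level hour->name dict built once by expanding each period's range; the function becomes a single table lookup with 'NIGHT' as the default for out-of-range hours.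
import Mathlib
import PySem

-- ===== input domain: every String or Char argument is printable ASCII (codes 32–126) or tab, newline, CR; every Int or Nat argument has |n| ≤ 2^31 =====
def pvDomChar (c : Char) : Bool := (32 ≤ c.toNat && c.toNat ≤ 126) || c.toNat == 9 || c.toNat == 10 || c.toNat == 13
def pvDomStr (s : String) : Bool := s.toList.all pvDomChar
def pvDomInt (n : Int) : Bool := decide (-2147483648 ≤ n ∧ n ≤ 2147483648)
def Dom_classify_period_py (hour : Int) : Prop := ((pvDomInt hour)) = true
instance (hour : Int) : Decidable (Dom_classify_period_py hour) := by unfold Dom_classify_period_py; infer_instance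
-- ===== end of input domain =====

-- B replaces A's per-call scan over the period ranges by an hour→name table built once,
-- so each call is a single dict lookup (objective: idiomatic; no asymptotic speed claim).

-- ===== PORT A =====
-- TIME_PERIODS as an ordered association list (dict iteration order)
def TIME_PERIODS : List (String × Int × Int) :=
  [("AM_PEAK", 6, 9), ("MIDDAY", 9, 15), ("PM_PEAK", 15, 19),
   ("EVENING", 19, 23), ("NIGHT", 23, 6)]

-- the for-loop with early return, recursing over the remaining items
def classify_period_go : List (String × Int × Int) → Int → String
  | [], _ => "NIGHT"
  | (name, s, e) :: rest, hour =>
    if s ≤ e then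
      if s ≤ hour ∧ hour < e then name else classify_period_go rest hour
    else  -- wraps midnight
      if hour ≥ s ∨ hour < e then name else classify_period_go rest hour

def classify_period_py (hour : Int) : String :=
  classify_period_go TIME_PERIODS hour

-- ===== PORT B =====
-- _PERIOD_BY_HOUR: the dict comprehension, built once by expanding each period's range
def PERIOD_BY_HOUR : PySem.Dict Int String :=
  TIME_PERIODS.foldl
    (fun d p =>
      let name := p.1; let s := p.2.1; let e := p.2.2
      (if s ≤ e then PySem.List.pyRange s e 1
       else PySem.List.pyRange s 24 1 ++ PySem.List.pyRange 0 e 1).foldl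
        (fun d h => d.insert h name) d)
    PySem.Dict.empty

def classify_period_py_alt (hour : Int) : String :=
  PERIOD_BY_HOUR.getD hour "NIGHT"

-- ===== PRECONDITION & SPEC =====
def Spec_classify_period_py (hour : Int) (out : String) : Prop := out = classify_period_py_alt hour
instance (hour : Int) (out : String) : Decidable (Spec_classify_period_py hour out) := by unfold Spec_classify_period_py; infer_instance

-- ===== CLAIM (what is proved, stated in full; the proofs are below) =====
def Claim_equal_classify_period_py : Prop := ∀ (hour : Int), Dom_classify_period_py hour → Spec_classify_period_py hour (classify_period_py hour)

-- ===== LEMMAS AND PROOFS =====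
-- the built table, evaluated
set_option maxHeartbeats 2000000 in
lemma table_eval : PERIOD_BY_HOUR = PySem.Dict.mk
    [(6, "AM_PEAK"), (7, "AM_PEAK"), (8, "AM_PEAK"),
     (9, "MIDDAY"), (10, "MIDDAY"), (11, "MIDDAY"), (12, "MIDDAY"), (13, "MIDDAY"), (14, "MIDDAY"),
     (15, "PM_PEAK"), (16, "PM_PEAK"), (17, "PM_PEAK"), (18, "PM_PEAK"),
     (19, "EVENING"), (20, "EVENING"), (21, "EVENING"), (22, "EVENING"),
     (23, "NIGHT"), (0, "NIGHT"), (1, "NIGHT"), (2, "NIGHT"), (3, "NIGHT"), (4, "NIGHT"), (5, "NIGHT")] := by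
  decide

set_option maxHeartbeats 2000000 in
lemma alt_out_of_range (hour : Int) (h : hour < 0 ∨ 24 ≤ hour) :
    classify_period_py_alt hour = "NIGHT" := by
  unfold classify_period_py_alt
  rw [table_eval]
  simp only [PySem.Dict.getD, PySem.Dict.get?_mk_cons, beq_iff_eq]
  rw [if_neg (by omega : ¬(6:Int) = hour)]
  rw [if_neg (by omega : ¬(7:Int) = hour)]
  rw [if_neg (by omega : ¬(8:Int) = hour)]
  rw [if_neg (by omega : ¬(9:Int) = hour)]
  rw [if_neg (by omega : ¬(10:Int) = hour)]
  rw [if_neg (by omega : ¬(11:Int) = hour)]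
  rw [if_neg (by omega : ¬(12:Int) = hour)]
  rw [if_neg (by omega : ¬(13:Int) = hour)]
  rw [if_neg (by omega : ¬(14:Int) = hour)]
  rw [if_neg (by omega : ¬(15:Int) = hour)]
  rw [if_neg (by omega : ¬(16:Int) = hour)]
  rw [if_neg (by omega : ¬(17:Int) = hour)]
  rw [if_neg (by omega : ¬(18:Int) = hour)]
  rw [if_neg (by omega : ¬(19:Int) = hour)]
  rw [if_neg (by omega : ¬(20:Int) = hour)]
  rw [if_neg (by omega : ¬(21:Int) = hour)]
  rw [if_neg (by omega : ¬(22:Int) = hour)]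
  rw [if_neg (by omega : ¬(23:Int) = hour)]
  rw [if_neg (by omega : ¬(0:Int) = hour)]
  rw [if_neg (by omega : ¬(1:Int) = hour)]
  rw [if_neg (by omega : ¬(2:Int) = hour)]
  rw [if_neg (by omega : ¬(3:Int) = hour)]
  rw [if_neg (by omega : ¬(4:Int) = hour)]
  rw [if_neg (by omega : ¬(5:Int) = hour)]
  rfl

lemma a_out_of_range (hour : Int) (h : hour < 0 ∨ 24 ≤ hour) :
    classify_period_py hour = "NIGHT" := by
  unfold classify_period_py TIME_PERIODS
  rw [classify_period_go]
  rw [if_pos (by omega : (6:Int) ≤ 9), if_neg (by omega : ¬((6:Int) ≤ hour ∧ hour < 9))]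
  rw [classify_period_go]
  rw [if_pos (by omega : (9:Int) ≤ 15), if_neg (by omega : ¬((9:Int) ≤ hour ∧ hour < 15))]
  rw [classify_period_go]
  rw [if_pos (by omega : (15:Int) ≤ 19), if_neg (by omega : ¬((15:Int) ≤ hour ∧ hour < 19))]
  rw [classify_period_go]
  rw [if_pos (by omega : (19:Int) ≤ 23), if_neg (by omega : ¬((19:Int) ≤ hour ∧ hour < 23))]
  rw [classify_period_go]
  rw [if_neg (by omega : ¬((23:Int) ≤ 6)), if_pos (by omega : hour ≥ 23 ∨ hour < 6)]

-- ===== VERDICT (by name: the statement is the Claim_ definition above) =====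
set_option maxHeartbeats 2000000 in
theorem classify_period_py_spec : Claim_equal_classify_period_py := by
  intro hour _
  unfold Spec_classify_period_py
  by_cases hin : 0 ≤ hour ∧ hour < 24
  · obtain ⟨h0, h24⟩ := hin
    interval_cases hour <;> decide
  · have h : hour < 0 ∨ 24 ≤ hour := by omega
    rw [alt_out_of_range hour h, a_out_of_range hour h]
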